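-- pv_equiv track=rewrite | github.com/austwel/advent-of-code | 2023/python/13/13.py | h_image
-- ===== SOURCE A (Python) =====
-- def h_image(image: list[str]) -> int:
--     cache = [image[0]]
--     i = 1
--     while i < len(image):
--         j = 0
--         temp_cache = cache.copy()
--         while len(temp_cache) > 0:
--             if i+j == len(image):
--                 return i
--             if image[i+j] != temp_cache[0]:
--                 break
--             temp_cache.pop(0)
--             j += 1
--         if len(temp_cache) == 0:
--             return i
--         else:
--             cache.insert(0, image[i])
--         i+=1
--     return 0
-- ===== SOURCE B (Python) =====
-- def h_image(image: list[str]) -> int: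
--     n = len(image)
--     for i in range(1, n):
--         lo, hi = i - 1, i
--         while lo >= 0 and hi < n and image[lo] == image[hi]:
--             lo -= 1
--             hi += 1
--         if lo < 0 or hi >= n:
--             return i
--     return 0
-- ===== Notes on version B (the rewrite author's own statement) =====
-- stated objective: faster
-- what changed: Replaced A's growing reversed-prefix cache with copy/pop(0)/insert(0) by a two-pointer outward comparison on indices, so no list is ever copied or mutated.
import Mathlib
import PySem

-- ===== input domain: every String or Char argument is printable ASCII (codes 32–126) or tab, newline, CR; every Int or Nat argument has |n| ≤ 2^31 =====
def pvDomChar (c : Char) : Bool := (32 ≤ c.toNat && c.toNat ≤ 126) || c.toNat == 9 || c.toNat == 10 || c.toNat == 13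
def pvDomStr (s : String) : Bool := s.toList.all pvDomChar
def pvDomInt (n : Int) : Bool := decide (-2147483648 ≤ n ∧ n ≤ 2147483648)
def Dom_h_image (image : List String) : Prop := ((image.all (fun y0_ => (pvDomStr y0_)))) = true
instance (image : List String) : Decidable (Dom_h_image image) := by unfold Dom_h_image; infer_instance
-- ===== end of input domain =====

-- B replaces A's reversed-prefix cache with copy/pop(0)/insert(0) by an index-based
-- two-pointer outward comparison: no list copies or mutations (objective: faster).

-- ===== PORT A =====
-- inner while loop of A: temp_cache is consumed from the front; `none` = the
-- `return i` inside the loop fired (i+j reached len(image)); `some temp` = the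
-- loop exited with the remaining temp_cache (empty: full match; nonempty: break).
def hImageInnerA (image : List String) (i : Nat) : Nat → List String → Option (List String)
  | _, [] => some []
  | j, t :: ts =>
    if i + j = image.length then none
    else if image.getD (i + j) "" ≠ t then some (t :: ts)
    else hImageInnerA image i (j + 1) ts

-- outer while loop of A: cache is the reversed prefix, grown by insert(0, image[i]);
-- the loop guard `i < len(image)` is encoded by the fuel `len(image) - i`
def hImageOuterA (image : List String) : Nat → Nat → List String → Int
  | 0, _, _ => 0
  | fuel + 1, i, cache =>
    match hImageInnerA image i 0 cache with
    | none => (i : Int)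
    | some temp =>
      if temp.isEmpty then (i : Int)
      else hImageOuterA image fuel (i + 1) (image.getD i "" :: cache)

def h_image (image : List String) : Int :=
  hImageOuterA image (image.length - 1) 1 [image.headD ""]   -- image[0]; Pre_ excludes [] where Python raises

-- ===== PORT B =====
-- inner while of B: expand lo/hi outward while in range and rows equal; true iff
-- the expansion ran off an edge (perfect mirror); guard `hi < n` is the fuel `n - hi`
def hImageExpandB (image : List String) : Nat → Int → Nat → Bool
  | 0, _, _ => true
  | fuel + 1, lo, hi =>
    if 0 ≤ lo then
      if image.getD lo.toNat "" == image.getD hi "" then hImageExpandB image fuel (lo - 1) (hi + 1)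
      else false
    else true

-- for i in range(1, n); fuel = n - i
def hImageLoopB (image : List String) : Nat → Nat → Int
  | 0, _ => 0
  | fuel + 1, i =>
    if hImageExpandB image (image.length - i) ((i : Int) - 1) i then (i : Int)
    else hImageLoopB image fuel (i + 1)

def h_image_alt (image : List String) : Int := hImageLoopB image (image.length - 1) 1

-- ===== PRECONDITION & SPEC =====
-- Pre_ excludes only the empty list, on which A raises IndexError at image[0].
def Pre_h_image (image : List String) : Prop := image ≠ []
instance (image : List String) : Decidable (Pre_h_image image) := by unfold Pre_h_image; infer_instance
def pvWitness_h_image : List String := ["#.#", "..#", "..#", "#.#"]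

def Spec_h_image (image : List String) (out : Int) : Prop := out = h_image_alt image
instance (image : List String) (out : Int) : Decidable (Spec_h_image image out) := by unfold Spec_h_image; infer_instance

-- ===== CLAIM (what is proved, stated in full; the proofs are below) =====
def Claim_equal_h_image : Prop := ∀ (image : List String), Dom_h_image image → Pre_h_image image → Spec_h_image image (h_image image)

-- ===== LEMMAS AND PROOFS =====

-- "the inner loop succeeded": A then returns i
def hImageInnerOK : Option (List String) → Bool
  | none => true
  | some temp => temp.isEmpty

lemma take_succ_reverse (image : List String) (m : Nat) (hm : m < image.length) :
    (image.take (m + 1)).reverse = image.getD m "" :: (image.take m).reverse := by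
  rw [List.take_add_one, List.getElem?_eq_getElem hm]
  simp [List.getD, List.getElem?_eq_getElem hm]

lemma expand_neg (image : List String) (fuel : Nat) (lo : Int) (hi : Nat) (h : lo < 0) :
    hImageExpandB image fuel lo hi = true := by
  cases fuel with
  | zero => rfl
  | succ f => simp [hImageExpandB, Int.not_le.mpr h]

-- invariant of the inner loops: A's temp_cache is the reversed prefix of length m,
-- B's lo is m - 1 and its fuel is len - hi; the two loops agree on success
lemma inner_eq (image : List String) :
    ∀ (m i j : Nat), j + m = i → i ≤ image.length → i + j ≤ image.length →
    hImageInnerOK (hImageInnerA image i j ((image.take m).reverse))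
      = hImageExpandB image (image.length - (i + j)) ((m : Int) - 1) (i + j) := by
  intro m
  induction m with
  | zero =>
    intro i j _ _ _
    simp only [List.take_zero, List.reverse_nil, hImageInnerA, hImageInnerOK,
      Nat.cast_zero, zero_sub]
    exact (expand_neg image _ _ _ (by omega)).symm
  | succ m ih =>
    intro i j hji hi hij
    have hm : m < image.length := by omega
    rw [take_succ_reverse image m hm, hImageInnerA]
    by_cases hend : i + j = image.length
    · have hfuel : image.length - (i + j) = 0 := by omega
      simp [hend, hImageInnerOK, hImageExpandB]
    · have hlt : i + j < image.length := by omega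
      have hfuel : image.length - (i + j) = (image.length - (i + j + 1)) + 1 := by omega
      have hlo : ((m + 1 : Nat) : Int) - 1 = (m : Int) := by push_cast; ring
      rw [hfuel, hlo, hImageExpandB]
      rw [if_pos (by positivity : (0 : Int) ≤ (m : Nat))]
      rw [Int.toNat_natCast, if_neg hend]
      by_cases heq : image.getD (i + j) "" = image.getD m ""
      · rw [if_neg (fun h => h heq), if_pos (beq_of_eq heq.symm)]
        have := ih i (j + 1) (by omega) hi (by omega)
        have harg : i + (j + 1) = i + j + 1 := by omega
        rw [harg] at this
        exact this
      · rw [if_pos heq, if_neg (fun hb => heq (eq_of_beq hb).symm)]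
        simp [hImageInnerOK]

-- the outer loops agree when A's cache is the reversed prefix of length i
lemma outer_eq (image : List String) :
    ∀ (fuel i : Nat), 1 ≤ i → i + fuel = image.length →
    hImageOuterA image fuel i ((image.take i).reverse) = hImageLoopB image fuel i := by
  intro fuel
  induction fuel with
  | zero => intro i _ _; rfl
  | succ fuel ih =>
    intro i hi1 hfi
    have hlt : i < image.length := by omega
    have hinner := inner_eq image i i 0 (by omega) (by omega) (by omega)
    simp only [Nat.add_zero] at hinner
    rw [hImageOuterA, hImageLoopB, ← hinner]
    cases hA : hImageInnerA image i 0 ((image.take i).reverse) with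
    | none => simp [hImageInnerOK]
    | some temp =>
      by_cases hte : temp.isEmpty = true
      · simp [hImageInnerOK, hte]
      · simp only [Bool.not_eq_true] at hte
        simp only [hImageInnerOK, hte, Bool.false_eq_true, if_false]
        rw [← take_succ_reverse image i hlt]
        exact ih (i + 1) (by omega) (by omega)

-- ===== VERDICT (by name: the statement is the Claim_ definition above) =====
theorem h_image_spec : Claim_equal_h_image := by
  intro image _ hpre
  unfold Spec_h_image h_image h_image_alt
  have h1 : [image.headD ""] = (image.take 1).reverse := by
    cases image with
    | nil => exact absurd rfl hpre
    | cons x xs => simp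
  have hlen : 1 ≤ image.length := by
    cases image with
    | nil => exact absurd rfl hpre
    | cons x xs => simp
  rw [h1]
  exact outer_eq image (image.length - 1) 1 le_rfl (by omega)
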